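-- pv_equiv track=rewrite | github.com/eliottcassidy2000/math | 04-computation/per_W_analysis.py | compute_per_W
-- ===== SOURCE A (Python) =====
-- from itertools import permutations, combinations
--
-- def compute_per_W(adj, n):
--     """per(W(x)) as polynomial in x. Degree up to n (all arcs forward in cycle cover)."""
--     per = [0]*(n+1)
--     for sigma in permutations(range(n)):
--         # Check derangement (no fixed points)
--         if any(sigma[i] == i for i in range(n)):
--             continue
--         fwd = sum(1 for i in range(n) if adj[i][sigma[i]])
--         per[fwd] += 1
--     return per
-- ===== SOURCE B (Python) =====
-- def compute_per_W(adj, n):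
--     """per(W(x)) as polynomial in x, by pruned DFS over derangements:
--     rows are assigned one at a time to an unused non-diagonal column, the
--     forward-arc count accumulates along the path, and no permutation tuple
--     is ever materialised or re-scanned."""
--     def go(i, avail, fwd, per):
--         if not avail:
--             per[fwd] += 1
--             return per
--         for j in avail:
--             if j != i:
--                 per = go(i + 1, [c for c in avail if c != j],
--                          fwd + (1 if adj[i][j] else 0), per)
--         return per
--     return go(0, list(range(n)), 0, [0] * (n + 1))
-- ===== Notes on version B (the rewrite author's own statement) =====
-- stated objective: alternative
-- what changed: Replaces generate-all-n!-permutations, filter out fixed points, then rescan each tuple for its forward-arc count, by a pruned depth-first search that assigns rows one at a time to unused non-diagonal columns and accumulates the forward-arc count incrementally, so non-derangement branches are cut at the first fixed point and no permutation tuple is materialised or rescanned.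
import Mathlib
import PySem

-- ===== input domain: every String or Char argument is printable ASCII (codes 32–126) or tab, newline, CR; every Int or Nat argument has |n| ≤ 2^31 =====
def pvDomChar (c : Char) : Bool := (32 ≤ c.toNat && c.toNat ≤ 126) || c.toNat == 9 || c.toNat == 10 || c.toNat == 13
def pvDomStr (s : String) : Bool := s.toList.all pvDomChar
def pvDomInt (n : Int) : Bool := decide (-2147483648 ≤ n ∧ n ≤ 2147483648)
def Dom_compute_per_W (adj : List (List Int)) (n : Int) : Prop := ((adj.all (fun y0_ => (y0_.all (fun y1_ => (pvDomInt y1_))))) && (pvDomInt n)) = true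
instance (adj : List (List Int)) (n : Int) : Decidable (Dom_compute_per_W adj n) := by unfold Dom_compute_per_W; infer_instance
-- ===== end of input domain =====

-- B replaces A's generate-all-permutations-then-filter-then-rescan loop by a pruned DFS
-- over derangement prefixes with an incrementally maintained forward-arc count (objective: alternative).

-- per[i] += 1  (both programs use it; totalised via pySetD/pyGetD, in range under Pre_)
def pvIncAt (per : List Int) (i : Int) : List Int :=
  PySem.List.pySetD per i (PySem.List.pyGetD per i 0 + 1)

-- ===== PORT A =====
def compute_per_W (adj : List (List Int)) (n : Int) : List Int :=
  (PySem.List.permutations (PySem.List.pyRange 0 n) (PySem.List.pyRange 0 n).length).foldl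
    (fun per sigma =>
      if (PySem.List.pyRange 0 n).any (fun i => PySem.List.pyGetD sigma i 0 == i) then per
      else
        pvIncAt per
          (((PySem.List.pyRange 0 n).map (fun i =>
              if PySem.List.pyGetD (PySem.List.pyGetD adj i []) (PySem.List.pyGetD sigma i 0) 0 ≠ 0
              then (1 : Int) else 0)).sum))
    (List.replicate (n + 1).toNat (0 : Int))

-- ===== PORT B =====
-- go(i, avail, fwd, per); fuel = len(avail) makes the recursion structural
def pvGo (adj : List (List Int)) (fuel : Nat) (i : Int) (avail : List Int) (fwd : Int)
    (per : List Int) : List Int :=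
  if avail.isEmpty then pvIncAt per fwd
  else
    match fuel with
    | 0 => per
    | k + 1 =>
      avail.foldl (fun acc j =>
        if j ≠ i then
          pvGo adj k (i + 1) (avail.filter (fun c => c ≠ j))
            (fwd + (if PySem.List.pyGetD (PySem.List.pyGetD adj i []) j 0 ≠ 0 then (1 : Int) else 0))
            acc
        else acc) per

def compute_per_W_alt (adj : List (List Int)) (n : Int) : List Int :=
  pvGo adj (PySem.List.pyRange 0 n).length 0 (PySem.List.pyRange 0 n) 0
    (List.replicate (n + 1).toNat (0 : Int))

-- ===== PRECONDITION & SPEC =====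
-- exactly the inputs on which Python A returns: n ≥ 0, and for n ≥ 2 the first n rows exist and
-- are long enough for every entry a derangement reads (row n-1 only needs n-1 columns)
def Pre_compute_per_W (adj : List (List Int)) (n : Int) : Prop :=
  0 ≤ n ∧ (2 ≤ n →
    (n ≤ (adj.length : Int) ∧
      ∀ i ∈ List.range n.toNat,
        (if (i : Int) = n - 1 then n - 1 else n) ≤ ((adj.getD i []).length : Int)))
instance (adj : List (List Int)) (n : Int) : Decidable (Pre_compute_per_W adj n) := by
  unfold Pre_compute_per_W; infer_instance
def pvWitness_compute_per_W : List (List Int) × Int := ([[0, 1], [1, 0]], 2)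

def Spec_compute_per_W (adj : List (List Int)) (n : Int) (out : List Int) : Prop :=
  out = compute_per_W_alt adj n
instance (adj : List (List Int)) (n : Int) (out : List Int) : Decidable (Spec_compute_per_W adj n out) := by
  unfold Spec_compute_per_W; infer_instance

-- ===== CLAIM (what is proved, stated in full; the proofs are below) =====
def Claim_equal_compute_per_W : Prop :=
  ∀ (adj : List (List Int)) (n : Int), Dom_compute_per_W adj n → Pre_compute_per_W adj n →
    Spec_compute_per_W adj n (compute_per_W adj n)

-- ===== LEMMAS AND PROOFS =====

-- structural forms of A's per-permutation fixed-point test and forward-arc score,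
-- with o the row offset of the first entry of sigma
def pvHasFix : Int → List Int → Bool
  | _, [] => false
  | o, x :: t => x == o || pvHasFix (o + 1) t

def pvScore (adj : List (List Int)) : Int → List Int → Int
  | _, [] => 0
  | o, x :: t =>
    (if PySem.List.pyGetD (PySem.List.pyGetD adj o []) x 0 ≠ 0 then (1 : Int) else 0) +
      pvScore adj (o + 1) t

theorem pvGetD_cons_pos (x : Int) (t : List Int) (i : Int) (h : 0 < i) (d : Int) :
    PySem.List.pyGetD (x :: t) i d = PySem.List.pyGetD t (i - 1) d := by
  obtain ⟨m, rfl⟩ : ∃ m : Nat, i = (m : Int) + 1 := ⟨(i - 1).toNat, by omega⟩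
  have h1 : ((m : Int) + 1) = ((m + 1 : Nat) : Int) := by push_cast; ring
  rw [h1, PySem.List.pyGetD_natCast]
  simp [PySem.List.pyGetD_natCast]

theorem pvRange_nil (o b : Int) (h : b ≤ o) : PySem.List.pyRange o b = [] := by
  apply List.eq_nil_iff_forall_not_mem.mpr
  intro x hx
  have := PySem.List.mem_pyRange_one.mp hx
  omega

theorem pvAny_bridge (sigma : List Int) (o b : Int)
    (h : (PySem.List.pyRange o b).length = sigma.length) :
    ((PySem.List.pyRange o b).any (fun k => PySem.List.pyGetD sigma (k - o) 0 == k))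
      = pvHasFix o sigma := by
  induction sigma generalizing o b with
  | nil =>
    have : PySem.List.pyRange o b = [] := List.length_eq_zero_iff.mp h
    simp [this, pvHasFix]
  | cons x t IH =>
    have hlt : o < b := by
      by_contra hle
      rw [pvRange_nil o b (by omega)] at h
      simp at h
    rw [PySem.List.pyRange_one_cons hlt] at h ⊢
    simp only [List.any_cons]
    have h0 : PySem.List.pyGetD (x :: t) (o - o) 0 = x := by
      simp [PySem.List.pyGetD_zero_cons]
    rw [h0]
    have hrest : ((PySem.List.pyRange (o + 1) b).any
        (fun k => PySem.List.pyGetD (x :: t) (k - o) 0 == k))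
        = ((PySem.List.pyRange (o + 1) b).any
            (fun k => PySem.List.pyGetD t (k - (o + 1)) 0 == k)) := by
      apply PySem.List.any_congr_mem
      intro k hk
      have hk1 : o + 1 ≤ k := (PySem.List.mem_pyRange_one.mp hk).1
      rw [pvGetD_cons_pos x t (k - o) (by omega) 0]
      have : k - o - 1 = k - (o + 1) := by ring
      rw [this]
    rw [hrest, IH (o + 1) b (by simpa using h)]
    simp [pvHasFix]

theorem pvSum_bridge (adj : List (List Int)) (sigma : List Int) (o b : Int)
    (h : (PySem.List.pyRange o b).length = sigma.length) :
    (((PySem.List.pyRange o b).map (fun k =>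
        if PySem.List.pyGetD (PySem.List.pyGetD adj k []) (PySem.List.pyGetD sigma (k - o) 0) 0 ≠ 0
        then (1 : Int) else 0)).sum) = pvScore adj o sigma := by
  induction sigma generalizing o b with
  | nil =>
    have : PySem.List.pyRange o b = [] := List.length_eq_zero_iff.mp h
    simp [this, pvScore]
  | cons x t IH =>
    have hlt : o < b := by
      by_contra hle
      rw [pvRange_nil o b (by omega)] at h
      simp at h
    rw [PySem.List.pyRange_one_cons hlt] at h ⊢
    simp only [List.map_cons, List.sum_cons]
    have h0 : PySem.List.pyGetD (x :: t) (o - o) 0 = x := by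
      simp [PySem.List.pyGetD_zero_cons]
    rw [h0]
    have hrest : ((PySem.List.pyRange (o + 1) b).map (fun k =>
        if PySem.List.pyGetD (PySem.List.pyGetD adj k []) (PySem.List.pyGetD (x :: t) (k - o) 0) 0 ≠ 0
        then (1 : Int) else 0))
        = ((PySem.List.pyRange (o + 1) b).map (fun k =>
            if PySem.List.pyGetD (PySem.List.pyGetD adj k []) (PySem.List.pyGetD t (k - (o + 1)) 0) 0 ≠ 0
            then (1 : Int) else 0)) := by
      apply List.map_congr_left
      intro k hk
      have hk1 : o + 1 ≤ k := (PySem.List.mem_pyRange_one.mp hk).1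
      rw [pvGetD_cons_pos x t (k - o) (by omega) 0]
      have : k - o - 1 = k - (o + 1) := by ring
      rw [this]
    rw [hrest, IH (o + 1) b (by simpa using h)]
    rfl

-- fold a list = fold its index range
theorem pvFoldl_range {β : Type} (l : List Int) (F : β → Int → β) (init : β) :
    l.foldl F init = (List.range l.length).foldl (fun acc k => F acc (l.getD k 0)) init := by
  have hmap : (List.range l.length).map (fun k => l.getD k 0) = l := by
    apply List.ext_getElem
    · simp
    · intro i h1 h2; simp [List.getD_eq_getElem?_getD, h2]
  conv_lhs => rw [← hmap]
  rw [List.foldl_map]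

-- the heart: B's DFS equals A's fold over itertools-order permutations, graded structurally
theorem pvGo_eq (adj : List (List Int)) :
    ∀ (N : Nat) (avail : List Int), avail.length = N → avail.Nodup →
      ∀ (i fwd : Int) (per : List Int),
        pvGo adj N i avail fwd per =
          (PySem.List.permutations avail N).foldl
            (fun acc sigma =>
              if pvHasFix i sigma then acc else pvIncAt acc (fwd + pvScore adj i sigma)) per := by
  intro N
  induction N with
  | zero =>
    intro avail hlen hnd i fwd per
    have hav : avail = [] := List.length_eq_zero_iff.mp hlen
    subst hav
    simp [pvGo, PySem.List.permutations_zero, pvHasFix, pvScore]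
  | succ m IH =>
    intro avail hlen hnd i fwd per
    have hne : avail ≠ [] := by
      intro hniz; rw [hniz] at hlen; simp at hlen
    have hempty : avail.isEmpty = false := by simp [hne]
    rw [pvGo, PySem.List.permutations_succ, List.foldl_flatMap,
      pvFoldl_range avail _ per, hlen]
    simp only [hempty, Bool.false_eq_true, if_false]
    apply PySem.List.foldl_congr_mem
    intro acc idx hidx
    have hidxlt : idx < avail.length := by rw [hlen]; exact List.mem_range.mp hidx
    have hget : avail[idx]? = some avail[idx] := List.getElem?_eq_getElem hidxlt
    have hgetD : avail.getD idx 0 = avail[idx] := List.getD_eq_getElem avail 0 hidxlt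
    simp only [hget, hgetD]
    rw [List.foldl_map]
    by_cases hji : avail[idx] = i
    · rw [if_neg (by simp [hji])]
      rw [PySem.List.foldl_congr_mem _ _ (fun acc' _ => acc') _
        (by intro acc' p hp; simp [pvHasFix, hji])]
      exact (PySem.List.foldl_ignore _ _).symm
    · rw [if_pos hji]
      have hfe : avail.filter (fun c => c ≠ avail[idx]) = avail.eraseIdx idx := by
        rw [← List.Nodup.erase_getElem hnd idx hidxlt, List.Nodup.erase_eq_filter hnd]
        apply List.filter_congr; intro x _
        rw [Bool.eq_iff_iff]; simp
      have hlen2 : (avail.eraseIdx idx).length = m := by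
        rw [List.length_eraseIdx]; simp [hlen]; omega
      have hnd2 : (avail.eraseIdx idx).Nodup := List.Nodup.eraseIdx idx hnd
      rw [hfe, IH (avail.eraseIdx idx) hlen2 hnd2 (i + 1) _ acc]
      apply PySem.List.foldl_congr_mem
      intro acc' p hp
      simp [pvHasFix, pvScore, hji, add_assoc]

-- pyRange 0 n has no duplicates
theorem pvRange_nodup (n : Int) : (PySem.List.pyRange 0 n).Nodup := by
  by_cases hn : 0 ≤ n
  · obtain ⟨m, rfl⟩ : ∃ m : Nat, n = (m : Int) := ⟨n.toNat, by omega⟩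
    rw [PySem.List.pyRange_zero_natCast]
    exact (List.nodup_range).map (fun a b => by exact_mod_cast id)
  · have : PySem.List.pyRange 0 n = [] := by
      apply List.eq_nil_iff_forall_not_mem.mpr
      intro x hx
      have := PySem.List.mem_pyRange_one.mp hx
      omega
    simp [this]

-- ===== VERDICT (by name: the statement is the Claim_ definition above) =====
theorem compute_per_W_spec : Claim_equal_compute_per_W := by
  intro adj n _ _
  unfold Spec_compute_per_W compute_per_W compute_per_W_alt
  rw [pvGo_eq adj (PySem.List.pyRange 0 n).length (PySem.List.pyRange 0 n) rfl (pvRange_nodup n)]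
  apply PySem.List.foldl_congr_mem
  intro acc sigma hs
  have hlen : sigma.length = (PySem.List.pyRange 0 n).length :=
    PySem.List.length_of_mem_permutations hs
  have hA : ((PySem.List.pyRange 0 n).any (fun i => PySem.List.pyGetD sigma i 0 == i))
      = pvHasFix 0 sigma := by
    rw [← pvAny_bridge sigma 0 n hlen.symm]
    apply PySem.List.any_congr_mem
    intro k _; rw [sub_zero]
  have hS : (((PySem.List.pyRange 0 n).map (fun i =>
      if PySem.List.pyGetD (PySem.List.pyGetD adj i []) (PySem.List.pyGetD sigma i 0) 0 ≠ 0
      then (1 : Int) else 0)).sum) = pvScore adj 0 sigma := by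
    rw [← pvSum_bridge adj sigma 0 n hlen.symm]
    congr 1
    apply List.map_congr_left
    intro k _; rw [sub_zero]
  rw [hA, hS, zero_add]
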